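-- pv_equiv track=rewrite | github.com/misc-de/WebApp-Manager | browser_profiles.py | _parse_profiles_ini_sections
-- ===== SOURCE A (Python) =====
-- def _parse_profiles_ini_sections(raw_text):
--     if not raw_text:
--         return []
--     lines = raw_text.splitlines(keepends=True)
--     sections = []
--     current_name = None
--     current_lines = []
--     for line in lines:
--         stripped = line.strip()
--         if stripped.startswith('[') and stripped.endswith(']'):
--             if current_name is not None:
--                 sections.append((current_name, current_lines))
--             current_name = stripped[1:-1]
--             current_lines = [line]
--         else:
--             if current_name is None:
--                 current_name = ''
--                 current_lines = []
--             current_lines.append(line)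
--     if current_name is not None:
--         sections.append((current_name, current_lines))
--     return sections
-- ===== SOURCE B (Python) =====
-- def _is_header(line):
--     s = line.strip()
--     return s.startswith('[') and s.endswith(']')
--
--
-- def _sections(lines):
--     if not lines:
--         return []
--     head, rest = lines[0], lines[1:]
--     nxt = next((j for j, l in enumerate(rest) if _is_header(l)), len(rest))
--     name = head.strip()[1:-1] if _is_header(head) else ''
--     return [(name, [head] + rest[:nxt])] + _sections(rest[nxt:])
--
--
-- def _parse_profiles_ini_sections(raw_text):
--     if not raw_text:
--         return []
--     return _sections(raw_text.splitlines(keepends=True))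
-- ===== Notes on version B (the rewrite author's own statement) =====
-- stated objective: alternative
-- what changed: A's one-pass state machine (current_name/current_lines accumulators threaded through the loop) is replaced by a recursive decomposition that finds the index of the next header line and splits off one whole section at a time.
import Mathlib
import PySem

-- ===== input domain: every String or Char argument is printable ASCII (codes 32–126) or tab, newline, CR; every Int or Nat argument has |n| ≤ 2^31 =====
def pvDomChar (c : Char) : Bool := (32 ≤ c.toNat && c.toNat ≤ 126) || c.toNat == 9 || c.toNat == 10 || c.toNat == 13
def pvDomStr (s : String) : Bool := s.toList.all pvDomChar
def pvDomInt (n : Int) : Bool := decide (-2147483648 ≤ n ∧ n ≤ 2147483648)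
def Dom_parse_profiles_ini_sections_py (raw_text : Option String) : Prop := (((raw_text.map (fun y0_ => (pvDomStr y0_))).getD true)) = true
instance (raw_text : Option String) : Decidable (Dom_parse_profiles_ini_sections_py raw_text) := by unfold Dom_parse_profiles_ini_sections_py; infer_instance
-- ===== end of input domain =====

-- B replaces A's one-pass state machine (current_name/current_lines accumulators) by a
-- recursive decomposition: find the index of the next header and split off one section at a time
-- (objective: alternative decomposition; same cost).

-- ===== PORT A =====

-- str.splitlines(keepends=True): exact on the input domain, where the only line-break
-- characters are '\n', '\r' and the pair '\r\n' (no \x0b/\x0c/\x85/… in the domain).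
def pvSplitlinesKeep (cs : List Char) (acc : List Char) : List (List Char) :=
  match cs with
  | [] => if acc = [] then [] else [acc.reverse]
  | '\r' :: '\n' :: rest => (acc.reverse ++ ['\r', '\n']) :: pvSplitlinesKeep rest []
  | '\r' :: rest => (acc.reverse ++ ['\r']) :: pvSplitlinesKeep rest []
  | '\n' :: rest => (acc.reverse ++ ['\n']) :: pvSplitlinesKeep rest []
  | c :: rest => pvSplitlinesKeep rest (c :: acc)

def pvLines (s : String) : List String := (pvSplitlinesKeep s.toList []).map String.ofList

-- stripped.startswith('[') and stripped.endswith(']')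
def pvIsHeader (line : String) : Bool :=
  let stripped := PySem.Str.strip line
  PySem.Str.startswith stripped "[" && PySem.Str.endswith stripped "]"

-- stripped[1:-1]
def pvName (line : String) : String :=
  PySem.Str.slice (PySem.Str.strip line) (some 1) (some (-1))

-- final 'if current_name is not None: sections.append(...)'
def pvFinishA (st : Option String × List String × List (String × List String)) :
    List (String × List String) :=
  match st.1 with
  | none => st.2.2
  | some n => st.2.2 ++ [(n, st.2.1)]

-- one iteration of A's for-loop; state = (current_name, current_lines, sections)
def pvStepA (st : Option String × List String × List (String × List String)) (line : String) :
    Option String × List String × List (String × List String) :=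
  if pvIsHeader line then
    let secs := match st.1 with
      | none => st.2.2
      | some n => st.2.2 ++ [(n, st.2.1)]
    (some (pvName line), [line], secs)
  else
    match st.1 with
    | none => (some "", [line], st.2.2)
    | some n => (some n, st.2.1 ++ [line], st.2.2)

def parse_profiles_ini_sections_py (raw_text : Option String) : List (String × List String) :=
  match raw_text with
  | none => []
  | some s =>
    if s = "" then []
    else
      pvFinishA ((pvLines s).foldl pvStepA (none, [], []))

-- ===== PORT B =====

-- next((j for j, l in enumerate(rest) if _is_header(l)), len(rest)): first header index, else length
def pvFindHeader : List String → Nat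
  | [] => 0
  | l :: ls => if pvIsHeader l then 0 else pvFindHeader ls + 1

-- rest[:nxt] / rest[nxt:] are List.take / List.drop: exact, the index nxt is a nonnegative Nat ≤ len
def pvSectionsAlt : List String → List (String × List String)
  | [] => []
  | head :: rest =>
    let nxt := pvFindHeader rest
    let name := if pvIsHeader head then pvName head else ""
    [(name, head :: rest.take nxt)] ++ pvSectionsAlt (rest.drop nxt)
termination_by l => l.length
decreasing_by simp

def parse_profiles_ini_sections_py_alt (raw_text : Option String) : List (String × List String) :=
  match raw_text with
  | none => []
  | some s => if s = "" then [] else pvSectionsAlt (pvLines s)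

-- ===== PRECONDITION & SPEC =====
def Spec_parse_profiles_ini_sections_py (raw_text : Option String) (out : List (String × List String)) : Prop := out = parse_profiles_ini_sections_py_alt raw_text
instance (raw_text : Option String) (out : List (String × List String)) : Decidable (Spec_parse_profiles_ini_sections_py raw_text out) := by unfold Spec_parse_profiles_ini_sections_py; infer_instance

-- ===== CLAIM (what is proved, stated in full; the proofs are below) =====
def Claim_equal_parse_profiles_ini_sections_py : Prop := ∀ (raw_text : Option String), Dom_parse_profiles_ini_sections_py raw_text → Spec_parse_profiles_ini_sections_py raw_text (parse_profiles_ini_sections_py raw_text)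

-- ===== LEMMAS AND PROOFS =====

theorem pvSectionsAlt_nil : pvSectionsAlt [] = [] := by
  rw [pvSectionsAlt.eq_def]

theorem pvSectionsAlt_cons (head : String) (rest : List String) :
    pvSectionsAlt (head :: rest) =
      ((if pvIsHeader head then pvName head else ""),
        head :: rest.take (pvFindHeader rest)) ::
        pvSectionsAlt (rest.drop (pvFindHeader rest)) := by
  rw [pvSectionsAlt.eq_def]
  rfl

-- A's loop, started in an open section (some n, cl, secs), closes that section at the next
-- header (or at the end) and then produces exactly B's remaining sections.
theorem pvFoldA_some (lines : List String) :
    ∀ (n : String) (cl : List String) (secs : List (String × List String)),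
    pvFinishA (lines.foldl pvStepA (some n, cl, secs)) =
    secs ++ (n, cl ++ lines.take (pvFindHeader lines)) ::
      pvSectionsAlt (lines.drop (pvFindHeader lines)) := by
  induction lines with
  | nil => intro n cl secs; simp [pvFinishA, pvFindHeader, pvSectionsAlt_nil]
  | cons l ls ih =>
    intro n cl secs
    by_cases h : pvIsHeader l
    · simp only [List.foldl_cons, pvStepA, h, if_true, pvFindHeader]
      rw [ih]
      simp [h, pvSectionsAlt_cons]
    · simp only [List.foldl_cons, pvStepA, h, if_false, Bool.false_eq_true, pvFindHeader]
      rw [ih]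
      simp

theorem pvFoldA_eq_alt (lines : List String) :
    pvFinishA (lines.foldl pvStepA (none, [], [])) = pvSectionsAlt lines := by
  cases lines with
  | nil => simp [pvFinishA, pvSectionsAlt_nil]
  | cons l ls =>
    by_cases h : pvIsHeader l
    · simp only [List.foldl_cons, pvStepA, h, if_true]
      rw [pvFoldA_some]
      simp [h, pvSectionsAlt_cons]
    · simp only [List.foldl_cons, pvStepA, h, if_false, Bool.false_eq_true]
      rw [pvFoldA_some]
      simp [h, pvSectionsAlt_cons]

-- ===== VERDICT (by name: the statement is the Claim_ definition above) =====
theorem parse_profiles_ini_sections_py_spec : Claim_equal_parse_profiles_ini_sections_py := by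
  intro raw_text _
  unfold Spec_parse_profiles_ini_sections_py parse_profiles_ini_sections_py parse_profiles_ini_sections_py_alt
  cases raw_text with
  | none => rfl
  | some s =>
    by_cases hs : s = ""
    · simp [hs]
    · simp only [hs, if_false]
      exact pvFoldA_eq_alt (pvLines s)
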